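-- pv_equiv track=rewrite | github.com/jandolezal/advent-of-code-2024 | 09/disk_fragmenter.py | _calculate_free_spaces
-- ===== SOURCE A (Python) =====
-- from collections import defaultdict
--
-- def _calculate_free_spaces(layout):
--     """Create map from index in layout to number of free blocks since index."""
--     free_streak = False
--     free_spaces = defaultdict(int)
--
--     for i, item in enumerate(layout):
--         if item is None and not free_streak:  # new free space
--             free_i = i
--             free_spaces[free_i] += 1
--             free_streak = True
--         elif item is None and free_streak:  # continuing in free space
--             free_spaces[free_i] += 1
--         else:  # must be file block
--             free_streak = False
--
--     return free_spaces
-- ===== SOURCE B (Python) =====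
-- from collections import defaultdict
-- from itertools import groupby
--
--
-- def _calculate_free_spaces(layout):
--     """Create map from index in layout to number of free blocks since index."""
--     free_spaces = defaultdict(int)
--     cursor = 0
--     for is_free, group in groupby(layout, key=lambda x: x is None):
--         n = len(list(group))
--         if is_free:
--             free_spaces[cursor] = n
--         cursor += n
--     return free_spaces
-- ===== Notes on version B (the rewrite author's own statement) =====
-- stated objective: alternative
-- what changed: Replaces the element-by-element boolean streak-flag loop (with a defaultdict increment per free block) with a run-length decomposition via itertools.groupby: each maximal run is consumed at once and a free run is recorded in one assignment keyed by a running cursor.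
import Mathlib
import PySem

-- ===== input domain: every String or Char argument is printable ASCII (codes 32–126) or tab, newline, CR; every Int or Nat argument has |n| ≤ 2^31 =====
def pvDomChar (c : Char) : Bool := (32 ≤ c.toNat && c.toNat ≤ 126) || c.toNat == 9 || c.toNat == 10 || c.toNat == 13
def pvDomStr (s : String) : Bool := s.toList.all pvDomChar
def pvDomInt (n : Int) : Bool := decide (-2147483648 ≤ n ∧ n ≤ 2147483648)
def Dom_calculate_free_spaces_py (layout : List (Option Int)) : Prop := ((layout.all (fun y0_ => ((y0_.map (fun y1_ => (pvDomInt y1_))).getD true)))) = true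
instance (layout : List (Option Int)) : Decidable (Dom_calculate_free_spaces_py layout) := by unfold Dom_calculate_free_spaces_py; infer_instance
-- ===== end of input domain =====

-- B replaces A's element-by-element streak-flag loop with a run-length (groupby) decomposition; neither mutates its argument.

-- ===== PORT A =====
-- A's loop: state = (free_streak, free_i, free_spaces), i = current enumerate index
def aGo (streak : Bool) (freeI : Int) (d : PySem.Dict Int Int) (i : Int) :
    List (Option Int) → PySem.Dict Int Int
  | [] => d
  | item :: rest =>
    if item.isNone && !streak then
      aGo true i (d.insert i (d.getD i 0 + 1)) (i + 1) rest
    else if item.isNone && streak then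
      aGo true freeI (d.insert freeI (d.getD freeI 0 + 1)) (i + 1) rest
    else
      aGo false freeI d (i + 1) rest

def calculate_free_spaces_py (layout : List (Option Int)) : List (Int × Int) :=
  (aGo false 0 PySem.Dict.empty 0 layout).items

-- ===== PORT B =====
-- B's groupby loop: consume one maximal run of equal is-None key per step
def altGo (cursor : Int) : List (Option Int) → List (Int × Int)
  | [] => []
  | x :: xs =>
    let n : Nat := (xs.takeWhile (fun y => y.isNone == x.isNone)).length + 1
    let rest := xs.dropWhile (fun y => y.isNone == x.isNone)
    if x.isNone then (cursor, (n : Int)) :: altGo (cursor + (n : Int)) rest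
    else altGo (cursor + (n : Int)) rest
  termination_by xs => xs.length
  decreasing_by
    all_goals
      simp only [List.length_cons]
      exact Nat.lt_succ_of_le (List.length_dropWhile_le _ _)

def calculate_free_spaces_py_alt (layout : List (Option Int)) : List (Int × Int) :=
  altGo 0 layout

-- ===== PRECONDITION & SPEC =====
def Spec_calculate_free_spaces_py (layout : List (Option Int)) (out : List (Int × Int)) : Prop := out = calculate_free_spaces_py_alt layout
instance (layout : List (Option Int)) (out : List (Int × Int)) : Decidable (Spec_calculate_free_spaces_py layout out) := by unfold Spec_calculate_free_spaces_py; infer_instance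

-- ===== CLAIM (what is proved, stated in full; the proofs are below) =====
def Claim_equal_calculate_free_spaces_py : Prop := ∀ (layout : List (Option Int)), Dom_calculate_free_spaces_py layout → Spec_calculate_free_spaces_py layout (calculate_free_spaces_py layout)

-- ===== LEMMAS AND PROOFS =====

lemma altGo_nil (i : Int) : altGo i [] = [] := by rw [altGo.eq_def]

lemma altGo_none (i : Int) (xs : List (Option Int)) : altGo i (none :: xs) =
    (i, (((xs.takeWhile (fun y => y.isNone)).length + 1 : Nat) : Int)) ::
      altGo (i + (((xs.takeWhile (fun y => y.isNone)).length + 1 : Nat) : Int))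
        (xs.dropWhile (fun y => y.isNone)) := by
  rw [altGo.eq_def]; simp

-- B skips a leading file block (groupby keeps grouping the non-free run)
lemma altGo_skip_some (i : Int) (a : Int) (xs : List (Option Int)) :
    altGo i (some a :: xs) = altGo (i + 1) xs := by
  cases xs with
  | nil => rw [altGo.eq_def]; simp [altGo_nil]
  | cons y ys =>
    cases y with
    | none =>
      rw [altGo.eq_def]
      simp
    | some b =>
      conv_rhs => rw [altGo.eq_def]
      rw [altGo.eq_def]
      simp only [Option.isNone_some, List.takeWhile_cons, List.dropWhile_cons,
        beq_self_eq_true, if_true, Bool.false_eq_true, if_false, List.length_cons]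
      congr 1
      push_cast
      omega

-- Main/streak invariant of A's loop, proved by strong induction on the list length.
-- Main (not in a streak): every key ≥ i is absent from d, so the rest of A's loop appends altGo i xs.
-- Streak (inside a free run begun at fI, counted c so far): the rest of the loop extends the
-- (fI, c) entry by the leading free run, then appends the rest of altGo.
lemma aGo_invariant : ∀ (N : Nat) (xs : List (Option Int)), xs.length ≤ N →
    ((∀ (fI i : Int) (d : PySem.Dict Int Int), (∀ j : Int, i ≤ j → d.contains j = false) →
        (aGo false fI d i xs).items = d.items ++ altGo i xs) ∧
     (∀ (fI c i : Int) (d : PySem.Dict Int Int), (∀ j : Int, fI ≤ j → d.contains j = false) → fI < i →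
        (aGo true fI (d.insert fI c) i xs).items
          = d.items ++ (fI, c + ((xs.takeWhile (fun y => y.isNone)).length : Int))
              :: altGo (i + ((xs.takeWhile (fun y => y.isNone)).length : Int))
                   (xs.dropWhile (fun y => y.isNone)))) := by
  intro N
  induction N with
  | zero =>
    intro xs hlen
    have hx : xs = [] := List.eq_nil_of_length_eq_zero (Nat.le_zero.mp hlen)
    subst hx
    constructor
    · intro fI i d hd
      simp [aGo, altGo_nil]
    · intro fI c i d hd hlt
      have hc : d.contains fI = false := hd fI le_rfl
      simp [aGo, PySem.Dict.items_insert_of_not_contains d c hc, altGo_nil]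
  | succ n ih =>
    intro xs hlen
    cases xs with
    | nil =>
      constructor
      · intro fI i d hd
        simp [aGo, altGo_nil]
      · intro fI c i d hd hlt
        have hc : d.contains fI = false := hd fI le_rfl
        simp [aGo, PySem.Dict.items_insert_of_not_contains d c hc, altGo_nil]
    | cons x rest =>
      have hrest : rest.length ≤ n := Nat.le_of_succ_le_succ hlen
      constructor
      · -- Main
        intro fI i d hd
        cases x with
        | some a =>
          have hd' : ∀ j : Int, i + 1 ≤ j → d.contains j = false := fun j hj => hd j (by omega)
          have hm := (ih rest hrest).1 fI (i + 1) d hd'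
          simp only [aGo, Option.isNone_some, Bool.false_and, Bool.false_eq_true, if_false]
          rw [hm, altGo_skip_some]
        | none =>
          have hc : d.contains i = false := hd i le_rfl
          have h0 : d.getD i 0 = 0 := PySem.Dict.getD_of_not_contains d 0 hc
          have hs := (ih rest hrest).2 i 1 (i + 1) d (fun j hj => hd j hj) (by omega)
          simp only [aGo, Option.isNone_none, Bool.not_false, Bool.true_and, if_true, h0, zero_add]
          rw [hs, altGo_none]
          push_cast
          ring_nf
      · -- Streak
        intro fI c i d hd hlt
        cases x with
        | some a =>
          have hd' : ∀ j : Int, i + 1 ≤ j → (d.insert fI c).contains j = false := by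
            intro j hj
            rw [PySem.Dict.contains_insert]
            have h1 : d.contains j = false := hd j (by omega)
            have hne : (j == fI) = false := by
              simp only [beq_eq_false_iff_ne, ne_eq]
              omega
            simp [hne, h1]
          have hm := (ih rest hrest).1 fI (i + 1) (d.insert fI c) hd'
          have hcfI : d.contains fI = false := hd fI le_rfl
          simp only [aGo, Option.isNone_some, Bool.false_and, Bool.false_eq_true, if_false,
            Bool.not_true]
          rw [hm, PySem.Dict.items_insert_of_not_contains d c hcfI]
          simp only [List.takeWhile_cons, List.dropWhile_cons, Option.isNone_some,
            Bool.false_eq_true, if_false, List.length_nil, Nat.cast_zero, add_zero]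
          rw [altGo_skip_some]
          simp
        | none =>
          have hgd : (d.insert fI c).getD fI 0 = c := PySem.Dict.getD_insert_self d fI c 0
          have hs := (ih rest hrest).2 fI (c + 1) (i + 1) d hd (by omega)
          simp only [aGo, Option.isNone_none, Bool.not_true, Bool.and_false, Bool.true_and,
            Bool.false_eq_true, if_false, if_true, hgd, PySem.Dict.insert_insert_self]
          rw [hs]
          simp only [List.takeWhile_cons, Option.isNone_none, List.dropWhile_cons, if_true,
            List.length_cons]
          push_cast
          ring_nf

-- ===== VERDICT (by name: the statement is the Claim_ definition above) =====
theorem calculate_free_spaces_py_spec : Claim_equal_calculate_free_spaces_py := by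
  intro layout _
  unfold Spec_calculate_free_spaces_py calculate_free_spaces_py calculate_free_spaces_py_alt
  have h := (aGo_invariant layout.length layout le_rfl).1 0 0 PySem.Dict.empty
    (fun j _ => PySem.Dict.contains_empty j)
  simpa using h
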